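-- pv_equiv track=rewrite | github.com/TYPW1/Evaluation-of-Frame-Transmission-Reliability-in-Automotive-Networks-Using-Enumeration-Approach | reliability_analysis_template.py | check_transmission_success
-- ===== SOURCE A (Python) =====
-- def check_transmission_success(source, destination, route, link_failure_combination):
--     # Convert the link failure combination to a set for easier checking
--     failed_links = set(link_failure_combination)
--
--     # If there is at least one path where none of the links have failed,
--     # then the transmission is successful.
--
--     # We will assume that 'route' is a list of all possible direct links
--     # from source to destination, including redundant paths.
--
--     #a dictionary where keys are nodes and values are sets of connected nodes
--     network_graph = {}
--     for link in route:
--         if link[0] not in network_graph: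
--             network_graph[link[0]] = set()
--         network_graph[link[0]].add(link[1])
--
--         # Since this is an undirected graph (for simplicity), we add the link in both directions
--         if link[1] not in network_graph:
--             network_graph[link[1]] = set()
--         network_graph[link[1]].add(link[0])
--
--     # Perform a Depth-First Search (DFS) to find if a path exists
--     def dfs(current_node, destination, visited):
--         if current_node == destination:
--             return True
--         visited.add(current_node)
--         for neighbor in network_graph.get(current_node, []):
--             if neighbor not in visited:
--                 # If the link is not failed, we can travel to the neighbor
--                 if (current_node, neighbor) not in failed_links and (neighbor, current_node) not in failed_links:
--                     if dfs(neighbor, destination, visited):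
--                         return True
--         return False
--
--     # Initialize visited set and start DFS from the source node
--     visited = set()
--     return dfs(source, destination, visited)
-- ===== SOURCE B (Python) =====
-- def check_transmission_success(source, destination, route, link_failure_combination):
--     failed = set(link_failure_combination)
--     open_edges = [(u, v) for (u, v) in route
--                   if (u, v) not in failed and (v, u) not in failed]
--     # Saturation: grow the set of nodes reachable from source over open edges
--     # until a full pass adds nothing (at most 2*len(open_edges)+1 passes needed).
--     reach = {source}
--     for _ in range(2 * len(open_edges) + 1):
--         changed = False
--         for u, v in open_edges:
--             if u in reach and v not in reach:
--                 reach.add(v)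
--                 changed = True
--             if v in reach and u not in reach:
--                 reach.add(u)
--                 changed = True
--         if not changed:
--             break
--     return destination in reach
-- ===== Notes on version B (the rewrite author's own statement) =====
-- stated objective: alternative
-- what changed: Replaces the recursive DFS with a non-recursive edge-relaxation saturation: the failed links are filtered out of the route once, then a reachable-set is grown by repeated passes over the open edge list until a pass adds nothing, so no adjacency dictionary, no recursion and no visited-set bookkeeping are needed.
import Mathlib
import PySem

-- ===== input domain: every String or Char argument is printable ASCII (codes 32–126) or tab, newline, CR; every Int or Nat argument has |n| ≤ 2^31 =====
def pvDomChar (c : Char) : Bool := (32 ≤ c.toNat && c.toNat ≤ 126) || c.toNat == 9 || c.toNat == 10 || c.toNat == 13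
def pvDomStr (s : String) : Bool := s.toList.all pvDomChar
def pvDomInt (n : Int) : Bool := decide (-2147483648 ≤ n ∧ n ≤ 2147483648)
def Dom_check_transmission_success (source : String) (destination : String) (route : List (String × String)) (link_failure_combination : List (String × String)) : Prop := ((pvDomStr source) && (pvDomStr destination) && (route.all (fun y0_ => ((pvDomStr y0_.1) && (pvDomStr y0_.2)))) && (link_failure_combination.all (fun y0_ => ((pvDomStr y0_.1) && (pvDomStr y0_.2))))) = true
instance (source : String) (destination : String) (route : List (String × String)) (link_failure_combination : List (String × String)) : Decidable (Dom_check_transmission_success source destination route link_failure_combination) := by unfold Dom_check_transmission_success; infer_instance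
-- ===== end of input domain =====

-- B replaces A's recursive DFS over an adjacency dictionary by a non-recursive
-- edge-relaxation saturation over the open-edge list (alternative algorithm, not faster).

-- ===== PORT A =====
-- one iteration of the network_graph construction loop (undirected adjacency dictionary)
def pvGStep (g : PySem.Dict String (PySem.Set String)) (link : String × String) :
    PySem.Dict String (PySem.Set String) :=
  let g := if g.contains link.1 then g else g.insert link.1 PySem.Set.empty
  let g := g.modify link.1 PySem.Set.empty (fun s => PySem.Set.add s link.2)
  let g := if g.contains link.2 then g else g.insert link.2 PySem.Set.empty
  g.modify link.2 PySem.Set.empty (fun s => PySem.Set.add s link.1)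

def pvBuildGraph (route : List (String × String)) : PySem.Dict String (PySem.Set String) :=
  route.foldl pvGStep PySem.Dict.empty

-- the recursive dfs with a shared visited set; fuel is only a totality guard
-- (never exhausted for the fuel value check_transmission_success passes)
def pvDfs (g : PySem.Dict String (PySem.Set String)) (failed : PySem.Set (String × String))
    (dest : String) : Nat → String → PySem.Set String → Bool × PySem.Set String
  | 0, _, visited => (false, visited)
  | fuel + 1, current, visited =>
    if current = dest then (true, visited)
    else
      (g.getD current PySem.Set.empty).foldl (fun acc n =>
        if acc.1 then acc
        else if PySem.Set.contains acc.2 n then acc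
        else if !(PySem.Set.contains failed (current, n)) && !(PySem.Set.contains failed (n, current)) then
          pvDfs g failed dest fuel n acc.2
        else acc)
        (false, PySem.Set.add visited current)

def check_transmission_success (source : String) (destination : String) (route : List (String × String)) (link_failure_combination : List (String × String)) : Bool :=
  let failed_links := PySem.Set.ofList link_failure_combination
  let network_graph := pvBuildGraph route
  (pvDfs network_graph failed_links destination (2 * route.length + 2) source PySem.Set.empty).1

-- ===== PORT B =====
def pvOpenEdges (route : List (String × String)) (link_failure_combination : List (String × String)) : List (String × String) :=
  let failed := PySem.Set.ofList link_failure_combination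
  route.filter (fun l => !(PySem.Set.contains failed (l.1, l.2)) && !(PySem.Set.contains failed (l.2, l.1)))

-- body of the inner 'for u, v in open_edges' loop, with the changed flag
def pvRelax (acc : PySem.Set String × Bool) (l : String × String) : PySem.Set String × Bool :=
  let acc := if PySem.Set.contains acc.1 l.1 && !(PySem.Set.contains acc.1 l.2) then
      (PySem.Set.add acc.1 l.2, true) else acc
  if PySem.Set.contains acc.1 l.2 && !(PySem.Set.contains acc.1 l.1) then
    (PySem.Set.add acc.1 l.1, true) else acc

def pvPass (edges : List (String × String)) (st : PySem.Set String × Bool) : PySem.Set String × Bool :=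
  edges.foldl pvRelax st

-- the outer 'for _ in range(2*len(open_edges)+1)' loop with its break
def pvLoop (edges : List (String × String)) : Nat → PySem.Set String → PySem.Set String
  | 0, reach => reach
  | k + 1, reach =>
    let st := pvPass edges (reach, false)
    if st.2 then pvLoop edges k st.1 else st.1

def check_transmission_success_alt (source : String) (destination : String) (route : List (String × String)) (link_failure_combination : List (String × String)) : Bool :=
  let open_edges := pvOpenEdges route link_failure_combination
  let reach := pvLoop open_edges (2 * open_edges.length + 1) (PySem.Set.add PySem.Set.empty source)
  PySem.Set.contains reach destination

-- ===== PRECONDITION & SPEC =====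
def Spec_check_transmission_success (source : String) (destination : String) (route : List (String × String)) (link_failure_combination : List (String × String)) (out : Bool) : Prop := out = check_transmission_success_alt source destination route link_failure_combination
instance (source : String) (destination : String) (route : List (String × String)) (link_failure_combination : List (String × String)) (out : Bool) : Decidable (Spec_check_transmission_success source destination route link_failure_combination out) := by unfold Spec_check_transmission_success; infer_instance

-- ===== CLAIM (what is proved, stated in full; the proofs are below) =====
def Claim_equal_check_transmission_success : Prop := ∀ (source : String) (destination : String) (route : List (String × String)) (link_failure_combination : List (String × String)), Dom_check_transmission_success source destination route link_failure_combination → Spec_check_transmission_success source destination route link_failure_combination (check_transmission_success source destination route link_failure_combination)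

-- ===== LEMMAS AND PROOFS =====

-- boolean-membership conversion helpers
theorem pvMemC {α : Type} [BEq α] [LawfulBEq α] {s : PySem.Set α} {x : α}
    (h : PySem.Set.contains s x = true) : x ∈ s := (PySem.Set.contains_iff s x).mp h

theorem pvCMem {α : Type} [BEq α] [LawfulBEq α] {s : PySem.Set α} {x : α}
    (h : x ∈ s) : PySem.Set.contains s x = true := (PySem.Set.contains_iff s x).mpr h

theorem pvCNotMem {α : Type} [BEq α] [LawfulBEq α] {s : PySem.Set α} {x : α}
    (h : x ∉ s) : PySem.Set.contains s x = false := by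
  cases hc : PySem.Set.contains s x
  · rfl
  · exact absurd (pvMemC hc) h

theorem pvNotMemC {α : Type} [BEq α] [LawfulBEq α] {s : PySem.Set α} {x : α}
    (h : PySem.Set.contains s x = false) : x ∉ s := by
  intro hm
  rw [pvCMem hm] at h
  exact Bool.noConfusion h

theorem pvCond_iff {α : Type} [BEq α] [LawfulBEq α] (s : PySem.Set α) (a b : α) :
    (PySem.Set.contains s a && !(PySem.Set.contains s b)) = true ↔ a ∈ s ∧ b ∉ s := by
  rw [Bool.and_eq_true, Bool.not_eq_true']
  constructor
  · rintro ⟨h1, h2⟩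
    exact ⟨pvMemC h1, pvNotMemC h2⟩
  · rintro ⟨h1, h2⟩
    exact ⟨pvCMem h1, pvCNotMem h2⟩

-- The common specification: one open undirected edge, and reachability over open edges.
def pvAdj (route : List (String × String)) (c n : String) : Prop :=
  (c, n) ∈ route ∨ (n, c) ∈ route

def pvOpen (lfc : List (String × String)) (c n : String) : Prop :=
  (c, n) ∉ lfc ∧ (n, c) ∉ lfc

def pvE (route lfc : List (String × String)) (c n : String) : Prop :=
  pvAdj route c n ∧ pvOpen lfc c n

theorem pvAdj_symm {route : List (String × String)} {c n : String}
    (h : pvAdj route c n) : pvAdj route n c := h.symm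

theorem pvOpen_symm {lfc : List (String × String)} {c n : String}
    (h : pvOpen lfc c n) : pvOpen lfc n c := ⟨h.2, h.1⟩

theorem pvE_symm {route lfc : List (String × String)} {c n : String}
    (h : pvE route lfc c n) : pvE route lfc n c := ⟨pvAdj_symm h.1, pvOpen_symm h.2⟩

-- the failed-link test of both programs decides pvOpen
theorem pvOpenCond_iff (lfc : List (String × String)) (c n : String) :
    (!(PySem.Set.contains (PySem.Set.ofList lfc) (c, n)) &&
      !(PySem.Set.contains (PySem.Set.ofList lfc) (n, c))) = true ↔ pvOpen lfc c n := by
  rw [Bool.and_eq_true, Bool.not_eq_true', Bool.not_eq_true']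
  constructor
  · rintro ⟨h1, h2⟩
    exact ⟨fun hm => pvNotMemC h1 ((PySem.Set.mem_ofList lfc _).mpr hm),
           fun hm => pvNotMemC h2 ((PySem.Set.mem_ofList lfc _).mpr hm)⟩
  · rintro ⟨h1, h2⟩
    exact ⟨pvCNotMem (fun hm => h1 ((PySem.Set.mem_ofList lfc _).mp hm)),
           pvCNotMem (fun hm => h2 ((PySem.Set.mem_ofList lfc _).mp hm))⟩

-- ---------- A side: the graph ----------

theorem pvEnsure_getD (g : PySem.Dict String (PySem.Set String)) (k x : String) :
    (if g.contains k then g else g.insert k PySem.Set.empty).getD x PySem.Set.empty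
      = g.getD x PySem.Set.empty := by
  cases hc : g.contains k with
  | true => simp
  | false =>
    simp only [Bool.false_eq_true, if_false, PySem.Dict.getD_insert]
    split_ifs with hx
    · subst hx
      exact (PySem.Dict.getD_of_not_contains g PySem.Set.empty hc).symm
    · rfl

theorem pvGStep_getD (g : PySem.Dict String (PySem.Set String)) (l : String × String)
    (c n : String) :
    (n ∈ (pvGStep g l).getD c PySem.Set.empty) ↔
      n ∈ g.getD c PySem.Set.empty ∨ (c = l.1 ∧ n = l.2) ∨ (c = l.2 ∧ n = l.1) := by
  unfold pvGStep
  simp only [PySem.Dict.getD_modify, pvEnsure_getD]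
  split_ifs with h2 h1 h1 <;>
    simp_all [PySem.Set.mem_add]

theorem pvBuildGraph_char_aux (route : List (String × String))
    (g : PySem.Dict String (PySem.Set String)) (c n : String) :
    (n ∈ (route.foldl pvGStep g).getD c PySem.Set.empty) ↔
      n ∈ g.getD c PySem.Set.empty ∨ pvAdj route c n := by
  induction route generalizing g with
  | nil => simp [pvAdj]
  | cons l rest ih =>
    rw [List.foldl_cons, ih, pvGStep_getD]
    simp only [pvAdj, List.mem_cons, Prod.ext_iff]
    constructor
    · rintro ((h | ⟨h1, h2⟩ | ⟨h1, h2⟩) | h | h) <;> tauto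
    · rintro (h | (⟨h1, h2⟩ | h) | (⟨h1, h2⟩ | h)) <;> tauto

theorem pvBuildGraph_char (route : List (String × String)) (c n : String) :
    (n ∈ (pvBuildGraph route).getD c PySem.Set.empty) ↔ pvAdj route c n := by
  rw [pvBuildGraph, pvBuildGraph_char_aux]
  simp [PySem.Dict.getD_empty, PySem.Set.empty]

theorem pvMem_keys_of_getD (d : PySem.Dict String (PySem.Set String)) (c n : String)
    (h : n ∈ d.getD c PySem.Set.empty) : c ∈ d.keys := by
  by_contra hc
  have hcf : d.contains c = false := by
    cases hcon : d.contains c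
    · rfl
    · exact absurd ((PySem.Dict.contains_iff_mem_keys d c).mp hcon) hc
  rw [PySem.Dict.getD_of_not_contains d PySem.Set.empty hcf] at h
  simp [PySem.Set.empty] at h

-- the 'ensure key then assign' shape shared by both halves of the build step
theorem pvEnsureInsert_len (g : PySem.Dict String (PySem.Set String)) (k : String)
    (v : PySem.Set String) :
    (((if g.contains k then g else g.insert k PySem.Set.empty)).insert k v).keys.length
      ≤ g.keys.length + 1 := by
  split_ifs with hc
  · rw [PySem.Dict.keys_insert_of_contains g v hc]
    omega
  · rw [PySem.Dict.keys_insert_of_contains _ v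
      (PySem.Dict.contains_insert_self g k PySem.Set.empty)]
    rw [PySem.Dict.keys_insert_of_not_contains g PySem.Set.empty (by simpa using hc)]
    simp

theorem pvGStep_keys_len (g : PySem.Dict String (PySem.Set String)) (l : String × String) :
    (pvGStep g l).keys.length ≤ g.keys.length + 2 := by
  simp only [pvGStep, PySem.Dict.modify]
  exact le_trans (pvEnsureInsert_len _ l.2 _) (Nat.add_le_add_right (pvEnsureInsert_len g l.1 _) 1)

theorem pvBuildGraph_keys_len (route : List (String × String)) :
    (pvBuildGraph route).keys.length ≤ 2 * route.length := by
  rw [pvBuildGraph]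
  have haux : ∀ (g : PySem.Dict String (PySem.Set String)),
      (route.foldl pvGStep g).keys.length ≤ g.keys.length + 2 * route.length := by
    induction route with
    | nil => intro g; simp
    | cons l rest ih =>
      intro g
      rw [List.foldl_cons]
      have h1 := ih (pvGStep g l)
      have h2 := pvGStep_keys_len g l
      simp only [List.length_cons]
      omega
  have h := haux PySem.Dict.empty
  simpa [PySem.Dict.keys_empty] using h

-- ---------- A side: the dfs ----------

-- the number of still-unvisited graph nodes (the dfs recursion measure)
def pvFLen (route : List (String × String)) (vis : PySem.Set String) : Nat :=
  ((pvBuildGraph route).keys.filter (fun k => !(PySem.Set.contains vis k))).length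

theorem pvFLen_mono (route : List (String × String)) {vis vis' : PySem.Set String}
    (h : vis ⊆ vis') : pvFLen route vis' ≤ pvFLen route vis := by
  unfold pvFLen
  rw [← List.countP_eq_length_filter, ← List.countP_eq_length_filter]
  apply List.countP_mono_left
  intro a _ ha
  rw [Bool.not_eq_true'] at ha ⊢
  exact pvCNotMem (fun hm => pvNotMemC ha (h hm))

theorem pvCountP_lt {α : Type} (l : List α) (p q : α → Bool)
    (hpq : ∀ a ∈ l, q a = true → p a = true)
    (a : α) (ha : a ∈ l) (hpa : p a = true) (hqa : q a = false) :
    l.countP q < l.countP p := by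
  induction l with
  | nil => cases ha
  | cons x xs ih =>
    rw [List.countP_cons, List.countP_cons]
    by_cases hax : a = x
    · subst hax
      rw [hpa, hqa]
      have hle : xs.countP q ≤ xs.countP p :=
        List.countP_mono_left (fun b hb => hpq b (List.mem_cons_of_mem _ hb))
      simp only [if_true, Bool.false_eq_true, if_false]
      omega
    · have hmem : a ∈ xs := by
        rcases List.mem_cons.mp ha with h' | h'
        · exact absurd h' hax
        · exact h'
      have hlt := ih (fun b hb => hpq b (List.mem_cons_of_mem _ hb)) hmem
      have hx : (if q x = true then (1 : Nat) else 0) ≤ (if p x = true then 1 else 0) := by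
        by_cases hq : q x = true
        · rw [if_pos hq, if_pos (hpq x List.mem_cons_self hq)]
        · rw [if_neg hq]
          split_ifs <;> omega
      omega

theorem pvFLen_add_lt (route : List (String × String)) {vis : PySem.Set String} {c : String}
    (hk : c ∈ (pvBuildGraph route).keys) (hc : c ∉ vis) :
    pvFLen route (PySem.Set.add vis c) < pvFLen route vis := by
  unfold pvFLen
  rw [← List.countP_eq_length_filter, ← List.countP_eq_length_filter]
  refine pvCountP_lt _ _ _ ?_ c hk ?_ ?_
  · intro a _ ha
    rw [Bool.not_eq_true'] at ha ⊢
    exact pvCNotMem (fun hm =>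
      pvNotMemC ha ((PySem.Set.mem_add vis c a).mpr (Or.inl hm)))
  · rw [Bool.not_eq_true']
    exact pvCNotMem hc
  · rw [pvCMem ((PySem.Set.mem_add vis c c).mpr (Or.inr rfl))]
    rfl

-- once the found flag is true the rest of the neighbor loop is skipped
theorem pvFoldl_stick {α β : Type} (f : α → β → α) (P : α → Prop)
    (hf : ∀ a b, P a → f a b = a) :
    ∀ (l : List β) (a : α), P a → l.foldl f a = a := by
  intro l
  induction l with
  | nil => intro a _; rfl
  | cons x xs ih => intro a ha; rw [List.foldl_cons, hf a x ha]; exact ih a ha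

theorem pvDfs_sound (route lfc : List (String × String)) (dest : String) :
    ∀ (fuel : Nat) (c : String) (vis : PySem.Set String),
    (pvDfs (pvBuildGraph route) (PySem.Set.ofList lfc) dest fuel c vis).1 = true →
    Relation.ReflTransGen (pvE route lfc) c dest := by
  intro fuel
  induction fuel with
  | zero => intro c vis h; simp [pvDfs] at h
  | succ fuel ih =>
    intro c vis h
    rw [pvDfs] at h
    by_cases hcd : c = dest
    · exact hcd ▸ Relation.ReflTransGen.refl
    · simp only [hcd, if_false] at h
      suffices inner : ∀ (ns : List String), (∀ n ∈ ns, pvAdj route c n) →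
          ∀ (acc : Bool × PySem.Set String),
          (acc.1 = true → Relation.ReflTransGen (pvE route lfc) c dest) →
          ((ns.foldl (fun acc n =>
            if acc.1 then acc
            else if PySem.Set.contains acc.2 n then acc
            else if !(PySem.Set.contains (PySem.Set.ofList lfc) (c, n)) && !(PySem.Set.contains (PySem.Set.ofList lfc) (n, c)) then
              pvDfs (pvBuildGraph route) (PySem.Set.ofList lfc) dest fuel n acc.2
            else acc) acc).1 = true) →
          Relation.ReflTransGen (pvE route lfc) c dest by
        exact inner _ (fun n hn => (pvBuildGraph_char route c n).mp hn)
          (false, PySem.Set.add vis c) (by simp) h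
      intro ns
      induction ns with
      | nil => intro _ acc hacc h; exact hacc h
      | cons n ns ihn =>
        intro hadj acc hacc h
        rw [List.foldl_cons] at h
        refine ihn (fun m hm => hadj m (List.mem_cons_of_mem _ hm)) _ ?_ h
        intro hstep
        by_cases h1 : acc.1 = true
        · exact hacc h1
        · simp only [h1] at hstep
          by_cases h2 : PySem.Set.contains acc.2 n = true
          · simp only [h2, if_true] at hstep
            exact hacc hstep
          · simp only [h2, Bool.false_eq_true, if_false] at hstep
            by_cases h3 : (!(PySem.Set.contains (PySem.Set.ofList lfc) (c, n)) && !(PySem.Set.contains (PySem.Set.ofList lfc) (n, c))) = true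
            · simp only [h3, if_true] at hstep
              have hRT := ih n acc.2 hstep
              exact Relation.ReflTransGen.head
                ⟨hadj n List.mem_cons_self, (pvOpenCond_iff lfc c n).mp h3⟩ hRT
            · simp only [h3, Bool.false_eq_true, if_false] at hstep
              exact hacc hstep

-- the closedness invariant of the visited set of a failed search
def pvGood (route lfc : List (String × String)) (dest : String)
    (vis vis' : PySem.Set String) : Prop :=
  ∀ x, x ∈ vis' → x ∉ vis → x ≠ dest ∧ ∀ y, pvE route lfc x y → y ∈ vis'

theorem pvGood_trans {route lfc : List (String × String)} {dest : String}
    {v0 v1 v2 : PySem.Set String} (h12 : v1 ⊆ v2)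
    (g1 : pvGood route lfc dest v0 v1) (g2 : pvGood route lfc dest v1 v2) :
    pvGood route lfc dest v0 v2 := by
  intro x hx2 hx0
  by_cases hx1 : x ∈ v1
  · obtain ⟨hd, hn⟩ := g1 x hx1 hx0
    exact ⟨hd, fun y hy => h12 (hn y hy)⟩
  · exact g2 x hx2 hx1

theorem pvDfs_complete (route lfc : List (String × String)) (dest : String) :
    ∀ (fuel : Nat) (c : String) (vis vis' : PySem.Set String),
    vis.Nodup → c ∉ vis → pvFLen route vis + 2 ≤ fuel →
    pvDfs (pvBuildGraph route) (PySem.Set.ofList lfc) dest fuel c vis = (false, vis') →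
    vis ⊆ vis' ∧ vis'.Nodup ∧ c ∈ vis' ∧ pvGood route lfc dest vis vis' := by
  intro fuel
  induction fuel with
  | zero => intro c vis vis' _ _ hfuel _; omega
  | succ fuel ih =>
    intro c vis vis' hnd hc hfuel h
    rw [pvDfs] at h
    by_cases hcd : c = dest
    · simp [hcd] at h
    · simp only [hcd, if_false] at h
      have inner : ∀ (ns : List String), (∀ n ∈ ns, pvAdj route c n) →
          ∀ (v0 v1 : PySem.Set String), v0.Nodup → pvFLen route v0 + 2 ≤ fuel →
          (ns.foldl (fun acc n =>
            if acc.1 then acc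
            else if PySem.Set.contains acc.2 n then acc
            else if !(PySem.Set.contains (PySem.Set.ofList lfc) (c, n)) && !(PySem.Set.contains (PySem.Set.ofList lfc) (n, c)) then
              pvDfs (pvBuildGraph route) (PySem.Set.ofList lfc) dest fuel n acc.2
            else acc) (false, v0)) = (false, v1) →
          v0 ⊆ v1 ∧ v1.Nodup ∧ pvGood route lfc dest v0 v1 ∧
            (∀ n ∈ ns, pvOpen lfc c n → n ∈ v1) := by
        intro ns
        induction ns with
        | nil =>
          intro _ v0 v1 hnd0 _ hf
          rw [List.foldl_nil, Prod.mk.injEq] at hf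
          obtain ⟨-, rfl⟩ := hf
          exact ⟨fun x hx => hx, hnd0, fun x hx hnx => absurd hx hnx, by simp⟩
        | cons n ns ihn =>
          intro hadj v0 v1 hnd0 hS hf
          rw [List.foldl_cons] at hf
          simp only [Bool.false_eq_true, if_false] at hf
          by_cases h2 : PySem.Set.contains v0 n = true
          · simp only [h2, if_true] at hf
            obtain ⟨hsub, hnd1, hgood, hrest⟩ :=
              ihn (fun m hm => hadj m (List.mem_cons_of_mem _ hm)) v0 v1 hnd0 hS hf
            refine ⟨hsub, hnd1, hgood, ?_⟩
            intro m hm hop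
            rcases List.mem_cons.mp hm with rfl | hm'
            · exact hsub (pvMemC h2)
            · exact hrest m hm' hop
          · simp only [h2, Bool.false_eq_true, if_false] at hf
            by_cases h3 : (!(PySem.Set.contains (PySem.Set.ofList lfc) (c, n)) && !(PySem.Set.contains (PySem.Set.ofList lfc) (n, c))) = true
            · simp only [h3, if_true] at hf
              rcases hw : pvDfs (pvBuildGraph route) (PySem.Set.ofList lfc) dest fuel n v0 with ⟨b, w⟩
              cases b
              · -- child failed; use the outer induction hypothesis
                have hnv0 : n ∉ v0 := pvNotMemC (by simpa using h2)
                obtain ⟨hv0w, hndw, hnw, hgoodw⟩ := ih n v0 w hnd0 hnv0 hS hw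
                rw [hw] at hf
                have hSw : pvFLen route w + 2 ≤ fuel := by
                  have := pvFLen_mono route hv0w
                  omega
                obtain ⟨hwv1, hnd1, hgood1, hrest⟩ :=
                  ihn (fun m hm => hadj m (List.mem_cons_of_mem _ hm)) w v1 hndw hSw hf
                refine ⟨fun x hx => hwv1 (hv0w hx), hnd1,
                  pvGood_trans hwv1 hgoodw hgood1, ?_⟩
                intro m hm hop
                rcases List.mem_cons.mp hm with rfl | hm'
                · exact hwv1 hnw
                · exact hrest m hm' hop
              · -- child succeeded: the flag is sticky, contradicting the final false
                rw [hw] at hf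
                rw [pvFoldl_stick _ (fun acc => acc.1 = true)
                  (fun a b ha => by simp [ha]) ns (true, w) rfl] at hf
                rw [Prod.mk.injEq] at hf
                exact Bool.noConfusion hf.1
            · simp only [h3, Bool.false_eq_true, if_false] at hf
              obtain ⟨hsub, hnd1, hgood, hrest⟩ :=
                ihn (fun m hm => hadj m (List.mem_cons_of_mem _ hm)) v0 v1 hnd0 hS hf
              refine ⟨hsub, hnd1, hgood, ?_⟩
              intro m hm hop
              rcases List.mem_cons.mp hm with rfl | hm'
              · exact absurd ((pvOpenCond_iff lfc c m).mpr hop) h3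
              · exact hrest m hm' hop
      -- assemble the outer conclusion
      have hv0nd : (PySem.Set.add vis c).Nodup := PySem.Set.nodup_add vis c hnd
      have hvisv0 : vis ⊆ PySem.Set.add vis c :=
        fun x hx => (PySem.Set.mem_add vis c x).mpr (Or.inl hx)
      have hcv0 : c ∈ PySem.Set.add vis c := (PySem.Set.mem_add vis c c).mpr (Or.inr rfl)
      by_cases hadjq : (pvBuildGraph route).getD c PySem.Set.empty = []
      · rw [hadjq, List.foldl_nil, Prod.mk.injEq] at h
        obtain ⟨-, rfl⟩ := h
        refine ⟨hvisv0, hv0nd, hcv0, ?_⟩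
        intro x hx hnx
        have hxc : x = c := by
          rcases (PySem.Set.mem_add vis c x).mp hx with h' | h'
          · exact absurd h' hnx
          · exact h'
        subst hxc
        refine ⟨hcd, ?_⟩
        intro y hy
        have hm := (pvBuildGraph_char route x y).mpr hy.1
        rw [hadjq] at hm
        cases hm
      · obtain ⟨m, hm⟩ := List.exists_mem_of_ne_nil _ hadjq
        have hck : c ∈ (pvBuildGraph route).keys := pvMem_keys_of_getD _ c m hm
        have hS : pvFLen route (PySem.Set.add vis c) + 2 ≤ fuel := by
          have := pvFLen_add_lt route hck hc
          omega
        obtain ⟨hsub, hnd1, hgood, hrest⟩ := inner _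
          (fun n hn => (pvBuildGraph_char route c n).mp hn) (PySem.Set.add vis c) vis'
          hv0nd hS h
        refine ⟨fun x hx => hsub (hvisv0 hx), hnd1, hsub hcv0, ?_⟩
        intro x hx hnx
        by_cases hxc : x = c
        · subst hxc
          refine ⟨hcd, ?_⟩
          intro y hy
          exact hrest y ((pvBuildGraph_char route x y).mpr hy.1) hy.2
        · have hxv0 : x ∉ PySem.Set.add vis c := by
            intro hmem
            rcases (PySem.Set.mem_add vis c x).mp hmem with h' | h'
            · exact hnx h'
            · exact hxc h'
          exact hgood x hx hxv0

theorem pvA_iff (source destination : String) (route lfc : List (String × String)) :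
    check_transmission_success source destination route lfc = true ↔
      Relation.ReflTransGen (pvE route lfc) source destination := by
  constructor
  · intro h
    exact pvDfs_sound route lfc destination _ source PySem.Set.empty h
  · intro hRT
    by_contra hfalse
    have hres : (pvDfs (pvBuildGraph route) (PySem.Set.ofList lfc) destination
        (2 * route.length + 2) source PySem.Set.empty).1 = false := by
      cases hr : (pvDfs (pvBuildGraph route) (PySem.Set.ofList lfc) destination
        (2 * route.length + 2) source PySem.Set.empty).1
      · rfl
      · exact absurd hr hfalse
    have hpair : pvDfs (pvBuildGraph route) (PySem.Set.ofList lfc) destination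
        (2 * route.length + 2) source PySem.Set.empty =
        (false, (pvDfs (pvBuildGraph route) (PySem.Set.ofList lfc) destination
          (2 * route.length + 2) source PySem.Set.empty).2) := by
      rw [← hres]
    have hfuel : pvFLen route PySem.Set.empty + 2 ≤ 2 * route.length + 2 := by
      have h1 : pvFLen route PySem.Set.empty ≤ (pvBuildGraph route).keys.length :=
        List.length_filter_le _ _
      have h2 := pvBuildGraph_keys_len route
      omega
    obtain ⟨hsub, hnd, hs, hgood⟩ := pvDfs_complete route lfc destination
      (2 * route.length + 2) source PySem.Set.empty _ List.nodup_nil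
      List.not_mem_nil hfuel hpair
    have hclosed : ∀ x, Relation.ReflTransGen (pvE route lfc) source x →
        x ∈ (pvDfs (pvBuildGraph route) (PySem.Set.ofList lfc) destination
          (2 * route.length + 2) source PySem.Set.empty).2 := by
      intro x hx
      induction hx with
      | refl => exact hs
      | tail _ he ihx => exact (hgood _ ihx List.not_mem_nil).2 _ he
    exact (hgood destination (hclosed destination hRT) List.not_mem_nil).1 rfl

-- ---------- B side ----------

theorem pvOpenEdges_char (route lfc : List (String × String)) (l : String × String) :
    l ∈ pvOpenEdges route lfc ↔ l ∈ route ∧ pvOpen lfc l.1 l.2 := by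
  unfold pvOpenEdges
  rw [List.mem_filter]
  exact and_congr_right (fun _ => pvOpenCond_iff lfc l.1 l.2)

theorem pvE_iff_openEdges (route lfc : List (String × String)) (c n : String) :
    pvE route lfc c n ↔ ∃ l ∈ pvOpenEdges route lfc, l = (c, n) ∨ l = (n, c) := by
  constructor
  · rintro ⟨hadj, hop⟩
    rcases hadj with h | h
    · exact ⟨(c, n), (pvOpenEdges_char route lfc (c, n)).mpr ⟨h, hop⟩, Or.inl rfl⟩
    · exact ⟨(n, c), (pvOpenEdges_char route lfc (n, c)).mpr ⟨h, pvOpen_symm hop⟩, Or.inr rfl⟩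
  · rintro ⟨l, hl, rfl | rfl⟩
    · obtain ⟨hr, hop⟩ := (pvOpenEdges_char route lfc _).mp hl
      exact ⟨Or.inl hr, hop⟩
    · obtain ⟨hr, hop⟩ := (pvOpenEdges_char route lfc _).mp hl
      exact ⟨Or.inr hr, pvOpen_symm hop⟩

theorem pvEdge_E {route lfc : List (String × String)} {l : String × String}
    (hl : l ∈ pvOpenEdges route lfc) : pvE route lfc l.1 l.2 := by
  obtain ⟨hr, hop⟩ := (pvOpenEdges_char route lfc l).mp hl
  exact ⟨Or.inl (by simpa using hr), hop⟩

theorem pvPass_cons (l : String × String) (es : List (String × String))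
    (st : PySem.Set String × Bool) :
    pvPass (l :: es) st = pvPass es (pvRelax st l) := by
  simp [pvPass]

theorem pvPass_master (edges : List (String × String)) :
    ∀ (r0 : PySem.Set String) (ch0 : Bool), ∃ (t : List String) (ch1 : Bool),
      pvPass edges (r0, ch0) = (r0 ++ t, ch1) ∧
      (∀ x ∈ t, ∃ l ∈ edges, x = l.1 ∨ x = l.2) ∧
      (ch1 = false → t = [] ∧ ch0 = false) ∧
      (ch1 = true → ch0 = true ∨ t ≠ []) ∧
      (r0.Nodup → (r0 ++ t).Nodup) := by
  induction edges with
  | nil =>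
    intro r0 ch0
    exact ⟨[], ch0, by simp [pvPass], by simp, fun h => ⟨rfl, h⟩, fun h => Or.inl h, by simp⟩
  | cons l es ih =>
    intro r0 ch0
    have hstep : ∃ (t0 : List String) (chs : Bool),
        pvRelax (r0, ch0) l = (r0 ++ t0, chs) ∧
        (∀ x ∈ t0, x = l.1 ∨ x = l.2) ∧
        (chs = false → t0 = [] ∧ ch0 = false) ∧
        (chs = true → ch0 = true ∨ t0 ≠ []) ∧
        (r0.Nodup → (r0 ++ t0).Nodup) := by
      unfold pvRelax
      by_cases c1 : (PySem.Set.contains r0 l.1 && !(PySem.Set.contains r0 l.2)) = true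
      · obtain ⟨h1m, h2m⟩ := (pvCond_iff r0 l.1 l.2).mp c1
        simp only [c1, if_true]
        have hadd : PySem.Set.add r0 l.2 = r0 ++ [l.2] := PySem.Set.add_of_not_mem h2m
        have c2 : (PySem.Set.contains (PySem.Set.add r0 l.2) l.2 &&
            !(PySem.Set.contains (PySem.Set.add r0 l.2) l.1)) = false := by
          cases hb : (PySem.Set.contains (PySem.Set.add r0 l.2) l.2 &&
              !(PySem.Set.contains (PySem.Set.add r0 l.2) l.1))
          · rfl
          · obtain ⟨-, hn1⟩ := (pvCond_iff _ _ _).mp hb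
            exact absurd ((PySem.Set.mem_add r0 l.2 l.1).mpr (Or.inl h1m)) hn1
        simp only [c2, Bool.false_eq_true, if_false]
        refine ⟨[l.2], true, by rw [hadd], by simp, by simp, fun _ => Or.inr (by simp), ?_⟩
        intro hnd
        rw [← hadd]
        exact PySem.Set.nodup_add r0 l.2 hnd
      · simp only [c1, Bool.false_eq_true, if_false]
        by_cases c2 : (PySem.Set.contains r0 l.2 && !(PySem.Set.contains r0 l.1)) = true
        · obtain ⟨h2m, h1m⟩ := (pvCond_iff r0 l.2 l.1).mp c2
          have hadd : PySem.Set.add r0 l.1 = r0 ++ [l.1] := PySem.Set.add_of_not_mem h1m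
          simp only [c2, if_true]
          refine ⟨[l.1], true, by rw [hadd], by simp, by simp, fun _ => Or.inr (by simp), ?_⟩
          intro hnd
          rw [← hadd]
          exact PySem.Set.nodup_add r0 l.1 hnd
        · simp only [c2, Bool.false_eq_true, if_false]
          exact ⟨[], ch0, by simp, by simp, fun h => ⟨rfl, h⟩, fun h => Or.inl h, by simp⟩
    obtain ⟨t0, chs, hrelax, ht0, hf0, htr0, hnd0⟩ := hstep
    rw [pvPass_cons, hrelax]
    obtain ⟨t, ch1, hpass, ht, hf, htr, hnd⟩ := ih (r0 ++ t0) chs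
    refine ⟨t0 ++ t, ch1, by rw [hpass, List.append_assoc], ?_, ?_, ?_, ?_⟩
    · intro x hx
      rcases List.mem_append.mp hx with hx' | hx'
      · rcases ht0 x hx' with h' | h' <;> exact ⟨l, List.mem_cons_self, by tauto⟩
      · obtain ⟨l', hl', h'⟩ := ht x hx'
        exact ⟨l', List.mem_cons_of_mem _ hl', h'⟩
    · intro h1
      obtain ⟨ht', hchs⟩ := hf h1
      obtain ⟨ht0', hch0⟩ := hf0 hchs
      refine ⟨?_, hch0⟩
      rw [ht0', ht']
      rfl
    · intro h1
      rcases htr h1 with hchs | htne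
      · rcases htr0 hchs with h' | h'
        · exact Or.inl h'
        · exact Or.inr (by simp [h'])
      · exact Or.inr (fun hx => htne (List.append_eq_nil_iff.mp hx).2)
    · intro hnd'
      have := hnd (hnd0 hnd')
      rwa [List.append_assoc] at this

theorem pvRelax_false {r0 r1 : PySem.Set String} {ch0 : Bool} {l : String × String}
    (h : pvRelax (r0, ch0) l = (r1, false)) :
    r1 = r0 ∧ ch0 = false ∧ (l.1 ∈ r0 → l.2 ∈ r0) ∧ (l.2 ∈ r0 → l.1 ∈ r0) := by
  unfold pvRelax at h
  by_cases c1 : (PySem.Set.contains r0 l.1 && !(PySem.Set.contains r0 l.2)) = true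
  · simp only [c1, if_true] at h
    split_ifs at h with hcnd <;> (rw [Prod.mk.injEq] at h; exact Bool.noConfusion h.2)
  · simp only [c1, Bool.false_eq_true, if_false] at h
    by_cases c2 : (PySem.Set.contains r0 l.2 && !(PySem.Set.contains r0 l.1)) = true
    · simp only [c2, if_true] at h
      rw [Prod.mk.injEq] at h
      exact Bool.noConfusion h.2
    · simp only [c2, Bool.false_eq_true, if_false] at h
      rw [Prod.mk.injEq] at h
      refine ⟨h.1.symm, h.2, ?_, ?_⟩
      · intro h1
        by_contra h2
        exact c1 ((pvCond_iff r0 l.1 l.2).mpr ⟨h1, h2⟩)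
      · intro h1
        by_contra h2
        exact c2 ((pvCond_iff r0 l.2 l.1).mpr ⟨h1, h2⟩)

theorem pvPass_fix (edges : List (String × String)) :
    ∀ (r0 : PySem.Set String), (pvPass edges (r0, false)).2 = false →
    ∀ l ∈ edges, (l.1 ∈ r0 → l.2 ∈ r0) ∧ (l.2 ∈ r0 → l.1 ∈ r0) := by
  induction edges with
  | nil => intro r0 _ l hl; cases hl
  | cons l es ih =>
    intro r0 h
    rcases hrx : pvRelax (r0, false) l with ⟨r1, chs⟩
    rw [pvPass_cons, hrx] at h
    obtain ⟨t, ch1, hpass, -, hf, -, -⟩ := pvPass_master es r1 chs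
    rw [hpass] at h
    have hch1 : ch1 = false := h
    have hchs : chs = false := (hf hch1).2
    rw [hchs] at hrx
    obtain ⟨hr1, -, himp1, himp2⟩ := pvRelax_false hrx
    intro l' hl'
    rcases List.mem_cons.mp hl' with rfl | hl''
    · exact ⟨himp1, himp2⟩
    · have hrec : (pvPass es (r0, false)).2 = false := by
        rw [hr1, hchs] at hpass
        rw [hpass]
        exact hch1
      exact ih r0 hrec l' hl''

theorem pvRelax_sound (route lfc : List (String × String)) (s : String)
    {l : String × String} (hEl : pvE route lfc l.1 l.2)
    (st : PySem.Set String × Bool)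
    (hr : ∀ x ∈ st.1, Relation.ReflTransGen (pvE route lfc) s x) :
    ∀ x ∈ (pvRelax st l).1, Relation.ReflTransGen (pvE route lfc) s x := by
  rcases st with ⟨r0, ch0⟩
  simp only at hr
  unfold pvRelax
  by_cases c1 : (PySem.Set.contains r0 l.1 && !(PySem.Set.contains r0 l.2)) = true
  · obtain ⟨h1m, -⟩ := (pvCond_iff r0 l.1 l.2).mp c1
    simp only [c1, if_true]
    have hr' : ∀ x ∈ PySem.Set.add r0 l.2, Relation.ReflTransGen (pvE route lfc) s x := by
      intro x hx
      rcases (PySem.Set.mem_add r0 l.2 x).mp hx with h' | rfl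
      · exact hr x h'
      · exact Relation.ReflTransGen.tail (hr l.1 h1m) hEl
    by_cases c2 : (PySem.Set.contains (PySem.Set.add r0 l.2) l.2 &&
        !(PySem.Set.contains (PySem.Set.add r0 l.2) l.1)) = true
    · simp only [c2, if_true]
      intro x hx
      rcases (PySem.Set.mem_add _ l.1 x).mp hx with h' | rfl
      · exact hr' x h'
      · exact hr l.1 h1m
    · simp only [c2, Bool.false_eq_true, if_false]
      exact hr'
  · simp only [c1, Bool.false_eq_true, if_false]
    by_cases c2 : (PySem.Set.contains r0 l.2 && !(PySem.Set.contains r0 l.1)) = true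
    · obtain ⟨h2m, -⟩ := (pvCond_iff r0 l.2 l.1).mp c2
      simp only [c2, if_true]
      intro x hx
      rcases (PySem.Set.mem_add r0 l.1 x).mp hx with h' | rfl
      · exact hr x h'
      · exact Relation.ReflTransGen.tail (hr l.2 h2m) (pvE_symm hEl)
    · simp only [c2, Bool.false_eq_true, if_false]
      exact hr

theorem pvPass_sound (route lfc : List (String × String)) (s : String) :
    ∀ (edges : List (String × String)), (∀ l ∈ edges, pvE route lfc l.1 l.2) →
    ∀ (st : PySem.Set String × Bool),
    (∀ x ∈ st.1, Relation.ReflTransGen (pvE route lfc) s x) →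
    ∀ x ∈ (pvPass edges st).1, Relation.ReflTransGen (pvE route lfc) s x := by
  intro edges
  induction edges with
  | nil => intro _ st hr x hx; exact hr x hx
  | cons l es ih =>
    intro hE st hr
    rw [pvPass_cons]
    exact ih (fun l' hl' => hE l' (List.mem_cons_of_mem _ hl')) (pvRelax st l)
      (pvRelax_sound route lfc s (hE l List.mem_cons_self) st hr)

theorem pvLoop_sound (route lfc : List (String × String)) (s : String)
    (edges : List (String × String)) (hE : ∀ l ∈ edges, pvE route lfc l.1 l.2) :
    ∀ (fuel : Nat) (r : PySem.Set String),
    (∀ x ∈ r, Relation.ReflTransGen (pvE route lfc) s x) →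
    ∀ x ∈ pvLoop edges fuel r, Relation.ReflTransGen (pvE route lfc) s x := by
  intro fuel
  induction fuel with
  | zero => intro r hr x hx; exact hr x hx
  | succ k ih =>
    intro r hr x hx
    simp only [pvLoop] at hx
    have hsound := pvPass_sound route lfc s edges hE (r, false) hr
    by_cases hch : (pvPass edges (r, false)).2 = true
    · simp only [hch, if_true] at hx
      exact ih _ hsound x hx
    · simp only [hch] at hx
      exact hsound x hx

theorem pvLoop_closed (edges : List (String × String)) (U : PySem.Set String)
    (hU : ∀ l ∈ edges, l.1 ∈ U ∧ l.2 ∈ U) (hUnd : U.Nodup) :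
    ∀ (fuel : Nat) (r : PySem.Set String), r.Nodup → (∀ x ∈ r, x ∈ U) →
    U.length ≤ fuel + r.length →
    r ⊆ pvLoop edges fuel r ∧
      (∀ l ∈ edges, (l.1 ∈ pvLoop edges fuel r → l.2 ∈ pvLoop edges fuel r) ∧
        (l.2 ∈ pvLoop edges fuel r → l.1 ∈ pvLoop edges fuel r)) := by
  intro fuel
  induction fuel with
  | zero =>
    intro r hnd hrU hlen
    have hUr : ∀ x ∈ U, x ∈ r := by
      intro x hx
      have hsub : r.toFinset ⊆ U.toFinset := by
        intro a ha
        exact List.mem_toFinset.mpr (hrU a (List.mem_toFinset.mp ha))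
      have hcard : U.toFinset.card ≤ r.toFinset.card := by
        rw [List.toFinset_card_of_nodup hnd, List.toFinset_card_of_nodup hUnd]
        simpa using hlen
      have heq := Finset.eq_of_subset_of_card_le hsub hcard
      exact List.mem_toFinset.mp (heq ▸ List.mem_toFinset.mpr hx)
    simp only [pvLoop]
    exact ⟨fun x hx => hx,
      fun l hl => ⟨fun _ => hUr l.2 (hU l hl).2, fun _ => hUr l.1 (hU l hl).1⟩⟩
  | succ k ih =>
    intro r hnd hrU hlen
    obtain ⟨t, ch1, hpass, ht, hf, htr, hndt⟩ := pvPass_master edges r false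
    simp only [pvLoop, hpass]
    cases ch1 with
    | false =>
      simp only [Bool.false_eq_true, if_false]
      obtain ⟨rfl, -⟩ := hf rfl
      rw [List.append_nil]
      exact ⟨fun x hx => hx, pvPass_fix edges r (by rw [hpass])⟩
    | true =>
      simp only [if_true]
      have htne : t ≠ [] := by
        rcases htr rfl with h' | h'
        · exact Bool.noConfusion h'
        · exact h'
      have hlen1 : 1 ≤ t.length := by
        cases t
        · exact absurd rfl htne
        · simp
      have hsubU : ∀ x ∈ r ++ t, x ∈ U := by
        intro x hx
        rcases List.mem_append.mp hx with hx' | hx'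
        · exact hrU x hx'
        · obtain ⟨l, hl, h'⟩ := ht x hx'
          rcases h' with rfl | rfl
          · exact (hU l hl).1
          · exact (hU l hl).2
      have hlen' : U.length ≤ k + (r ++ t).length := by
        rw [List.length_append]
        omega
      have happ := ih (r ++ t) (hndt hnd) hsubU hlen'
      exact ⟨fun x hx => happ.1 (List.mem_append.mpr (Or.inl hx)), happ.2⟩

theorem pvB_iff (source destination : String) (route lfc : List (String × String)) :
    check_transmission_success_alt source destination route lfc = true ↔
      Relation.ReflTransGen (pvE route lfc) source destination := by
  unfold check_transmission_success_alt
  set edges := pvOpenEdges route lfc with hedges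
  set U : PySem.Set String :=
    PySem.Set.ofList (source :: edges.flatMap (fun l => [l.1, l.2])) with hUdef
  have hsrcU : source ∈ U := (PySem.Set.mem_ofList _ _).mpr List.mem_cons_self
  have hU : ∀ l ∈ edges, l.1 ∈ U ∧ l.2 ∈ U := by
    intro l hl
    constructor <;>
    · apply (PySem.Set.mem_ofList _ _).mpr
      apply List.mem_cons_of_mem
      exact List.mem_flatMap.mpr ⟨l, hl, by simp⟩
  have hUnd : U.Nodup := PySem.Set.nodup_ofList _
  have hUlen : U.length ≤ 1 + 2 * edges.length := by
    have h1 : U.length ≤ (source :: edges.flatMap (fun l => [l.1, l.2])).length :=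
      PySem.Set.length_ofList_le _
    have h2 : (edges.flatMap (fun l => [l.1, l.2])).length = 2 * edges.length := by
      induction edges with
      | nil => simp
      | cons l es ihe => simp [List.flatMap_cons] at ihe ⊢; omega
    simp only [List.length_cons] at h1
    omega
  have hr0 : PySem.Set.add PySem.Set.empty source = [source] :=
    PySem.Set.add_of_not_mem List.not_mem_nil
  rw [hr0]
  have hr0U : ∀ x ∈ ([source] : PySem.Set String), x ∈ U := by
    intro x hx
    rcases List.mem_singleton.mp hx with rfl
    exact hsrcU
  obtain ⟨hsub, hclosed⟩ := pvLoop_closed edges U hU hUnd (2 * edges.length + 1)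
    [source] (List.nodup_singleton _) hr0U (by simp only [List.length_singleton]; omega)
  constructor
  · intro h
    have hd : destination ∈ pvLoop edges (2 * edges.length + 1) [source] := pvMemC h
    exact pvLoop_sound route lfc source edges (fun l hl => pvEdge_E hl)
      (2 * edges.length + 1) [source]
      (fun x hx => by rcases List.mem_singleton.mp hx with rfl; exact Relation.ReflTransGen.refl)
      destination hd
  · intro hRT
    apply pvCMem
    have hcl : ∀ x, Relation.ReflTransGen (pvE route lfc) source x →
        x ∈ pvLoop edges (2 * edges.length + 1) [source] := by
      intro x hx
      induction hx with
      | refl => exact hsub (List.mem_singleton.mpr rfl)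
      | tail _ he ihx =>
        rename_i b c _
        obtain ⟨l, hl, hlc⟩ := (pvE_iff_openEdges route lfc b c).mp he
        rcases hlc with rfl | rfl
        · exact (hclosed _ hl).1 ihx
        · exact (hclosed _ hl).2 ihx
    exact hcl destination hRT

-- ===== VERDICT (by name: the statement is the Claim_ definition above) =====
theorem check_transmission_success_spec : Claim_equal_check_transmission_success := by
  intro source destination route lfc _
  unfold Spec_check_transmission_success
  have hA := pvA_iff source destination route lfc
  have hB := pvB_iff source destination route lfc
  cases hA' : check_transmission_success source destination route lfc <;>
    cases hB' : check_transmission_success_alt source destination route lfc <;>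
      simp_all
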